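-- pv_equiv track=rewrite | github.com/CobblerOfShoes/ComputerSecurity-SP26 | HW2/Part3_Vigenere.py | _findCommonFactors
-- ===== SOURCE A (Python) =====
-- def _findCommonFactors(distances: list):
--   commonFactors = {}
--   for distance in distances:
--     for i in range(2, distance + 1):
--       if distance % i == 0:
--         if i not in commonFactors:
--           commonFactors[i] = 0
--         commonFactors[i] += 1
--   return commonFactors
-- ===== SOURCE B (Python) =====
-- def _findCommonFactors(distances: list):
--   factors = dict.fromkeys(i for d in distances for i in range(2, d + 1) if d % i == 0)
--   return {i: sum(1 for d in distances if i <= d and d % i == 0) for i in factors}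
-- ===== Notes on version B (the rewrite author's own statement) =====
-- stated objective: simpler
-- what changed: A builds the dict in one pass, maintaining per-factor tallies incrementally with contains/init/increment; B first computes the ordered deduplicated list of factors (dict.fromkeys over the divisor enumeration) and then computes each factor's count by a single whole-list scan in a dict comprehension.
import Mathlib
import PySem

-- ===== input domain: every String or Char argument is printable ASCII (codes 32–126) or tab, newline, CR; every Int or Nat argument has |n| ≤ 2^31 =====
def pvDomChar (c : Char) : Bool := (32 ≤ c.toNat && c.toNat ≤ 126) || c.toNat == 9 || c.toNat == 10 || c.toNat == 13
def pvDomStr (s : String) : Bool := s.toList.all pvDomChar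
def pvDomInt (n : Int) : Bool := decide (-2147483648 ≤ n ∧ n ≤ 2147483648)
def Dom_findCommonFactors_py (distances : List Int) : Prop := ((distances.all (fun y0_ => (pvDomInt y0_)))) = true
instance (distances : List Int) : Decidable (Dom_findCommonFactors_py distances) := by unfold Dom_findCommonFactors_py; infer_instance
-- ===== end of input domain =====

-- B replaces A's incremental per-key dict tallies by a two-step decomposition (ordered factor list, then one count per factor); objective: simpler, not faster.

-- ===== PORT A =====
def findCommonFactors_py (distances : List Int) : List (Int × Int) :=
  (distances.foldl (fun cf distance =>
      (PySem.List.pyRange 2 (distance + 1) 1).foldl (fun cf i =>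
        if PySem.Int.mod distance i == 0 then
          -- 'if i not in commonFactors: commonFactors[i] = 0' then 'commonFactors[i] += 1'
          (if cf.contains i then cf else cf.insert i 0).modify i 0 (· + 1)
        else cf) cf)
    PySem.Dict.empty).items

-- ===== PORT B =====
def findCommonFactors_py_alt (distances : List Int) : List (Int × Int) :=
  -- factors = dict.fromkeys(i for d in distances for i in range(2, d+1) if d % i == 0)
  let factors := PySem.List.dedup (distances.flatMap (fun d =>
      (PySem.List.pyRange 2 (d + 1) 1).filter (fun i => PySem.Int.mod d i == 0)))
  -- {i: sum(1 for d in distances if i <= d and d % i == 0) for i in factors}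
  factors.map (fun i =>
    (i, ((distances.filter (fun d => decide (i ≤ d) && (PySem.Int.mod d i == 0))).length : Int)))

-- ===== PRECONDITION & SPEC =====
def Spec_findCommonFactors_py (distances : List Int) (out : List (Int × Int)) : Prop := out = findCommonFactors_py_alt distances
instance (distances : List Int) (out : List (Int × Int)) : Decidable (Spec_findCommonFactors_py distances out) := by unfold Spec_findCommonFactors_py; infer_instance

-- ===== CLAIM (what is proved, stated in full; the proofs are below) =====
def Claim_equal_findCommonFactors_py : Prop := ∀ (distances : List Int), Dom_findCommonFactors_py distances → Spec_findCommonFactors_py distances (findCommonFactors_py distances)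

-- ===== LEMMAS AND PROOFS =====

-- the divisor stream both programs enumerate
def pvDivStream (distances : List Int) : List Int :=
  distances.flatMap (fun d =>
    (PySem.List.pyRange 2 (d + 1) 1).filter (fun i => PySem.Int.mod d i == 0))

-- A's per-hit update is exactly Counter's modify step
lemma pv_step_eq (cf : PySem.Dict Int Int) (i : Int) :
    (if cf.contains i then cf else cf.insert i 0).modify i 0 (· + 1) = cf.modify i 0 (· + 1) := by
  by_cases h : cf.contains i
  · simp [h]
  · simp [pysem, PySem.Dict.modify, h]

-- the guarded inner loop is a Counter fold over the filtered range
lemma pv_inner (l : List Int) (p : Int → Bool) (b : PySem.Dict Int Int) :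
    l.foldl (fun cf i => if p i then
        (if cf.contains i then cf else cf.insert i 0).modify i 0 (· + 1) else cf) b
      = (l.filter p).foldl (fun cf i => cf.modify i 0 (· + 1)) b := by
  have hstep : (fun (cf : PySem.Dict Int Int) i => if p i = true then
      (if cf.contains i = true then cf else cf.insert i 0).modify i 0 (· + 1) else cf)
      = (fun cf i => if p i = true then cf.modify i 0 (· + 1) else cf) := by
    funext cf i
    by_cases h : p i = true <;> simp [h, pv_step_eq]
  rw [hstep, List.foldl_filter]

-- nested loop over distances = Counter fold over the flattened divisor stream
lemma pv_foldA_aux (distances : List Int) (b : PySem.Dict Int Int) :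
    (distances.foldl (fun cf distance =>
        (PySem.List.pyRange 2 (distance + 1) 1).foldl (fun cf i =>
          if PySem.Int.mod distance i == 0 then
            (if cf.contains i then cf else cf.insert i 0).modify i 0 (· + 1)
          else cf) cf) b)
      = (pvDivStream distances).foldl (fun cf i => cf.modify i 0 (· + 1)) b := by
  induction distances generalizing b with
  | nil => rfl
  | cons d ds ih =>
    simp only [List.foldl_cons, pvDivStream, List.flatMap_cons, List.foldl_append]
    rw [pv_inner]
    exact ih _

-- nested guarded loop = fold over the flattened divisor stream
lemma pv_foldA_eq (distances : List Int) :
    (distances.foldl (fun cf distance =>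
        (PySem.List.pyRange 2 (distance + 1) 1).foldl (fun cf i =>
          if PySem.Int.mod distance i == 0 then
            (if cf.contains i then cf else cf.insert i 0).modify i 0 (· + 1)
          else cf) cf)
      PySem.Dict.empty) = PySem.Dict.counter (pvDivStream distances) := by
  rw [PySem.Dict.counter_eq_foldl]
  exact pv_foldA_aux distances PySem.Dict.empty

-- every enumerated divisor is ≥ 2
lemma pv_two_le_of_mem {distances : List Int} {k : Int} (h : k ∈ pvDivStream distances) : 2 ≤ k := by
  rcases List.mem_flatMap.mp h with ⟨d, _, hm⟩
  exact (PySem.List.mem_pyRange_one.mp (List.mem_filter.mp hm).1).1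

-- occurrences in the stream = distances the factor divides
lemma pv_count_eq (distances : List Int) (k : Int) (hk : 2 ≤ k) :
    (pvDivStream distances).count k
      = (distances.filter (fun d => decide (k ≤ d) && (PySem.Int.mod d k == 0))).length := by
  induction distances with
  | nil => rfl
  | cons d ds ih =>
    have hin : ((PySem.List.pyRange 2 (d + 1) 1).filter
        (fun i => PySem.Int.mod d i == 0)).count k
        = if decide (k ≤ d) && (PySem.Int.mod d k == 0) then 1 else 0 := by
      by_cases hc : (decide (k ≤ d) && (PySem.Int.mod d k == 0)) = true
      · have hcs := hc
        simp only [Bool.and_eq_true, decide_eq_true_eq] at hcs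
        have hmem : k ∈ (PySem.List.pyRange 2 (d + 1) 1).filter
            (fun i => PySem.Int.mod d i == 0) :=
          List.mem_filter.mpr ⟨PySem.List.mem_pyRange_one.mpr ⟨hk, by omega⟩, hcs.2⟩
        rw [List.count_eq_one_of_mem ((PySem.List.nodup_pyRange_one _ _).filter _) hmem, if_pos hc]
      · have hnm : k ∉ (PySem.List.pyRange 2 (d + 1) 1).filter
            (fun i => PySem.Int.mod d i == 0) := by
          intro hmem
          rcases List.mem_filter.mp hmem with ⟨hr, hdv⟩
          have hb := (PySem.List.mem_pyRange_one.mp hr).2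
          exact hc (by simp only [Bool.and_eq_true, decide_eq_true_eq]; exact ⟨by omega, hdv⟩)
        rw [List.count_eq_zero.mpr hnm, if_neg hc]
    simp only [pvDivStream, List.flatMap_cons, List.count_append, List.filter_cons]
    rw [show (ds.flatMap (fun d => (PySem.List.pyRange 2 (d + 1) 1).filter
        (fun i => PySem.Int.mod d i == 0))) = pvDivStream ds from rfl, ih, hin]
    rcases Bool.eq_false_or_eq_true (decide (k ≤ d) && (PySem.Int.mod d k == 0)) with hc | hc <;>
      simp [hc]
    omega


-- ===== VERDICT (by name: the statement is the Claim_ definition above) =====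
theorem findCommonFactors_py_spec : Claim_equal_findCommonFactors_py := by
  intro distances _
  unfold Spec_findCommonFactors_py findCommonFactors_py findCommonFactors_py_alt
  rw [pv_foldA_eq, PySem.Dict.items_counter]
  simp only [PySem.List.dedup_eq_ofList]
  refine List.map_congr_left ?_
  intro k hk
  have hk2 : 2 ≤ k := pv_two_le_of_mem ((PySem.Set.mem_ofList _ _).mp hk)
  rw [pv_count_eq distances k hk2]
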